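-- pv_equiv track=rewrite | github.com/shashankp28/MyLocal | moss/6.py | value_cut
-- ===== SOURCE A (Python) =====
-- def sort(sub_li, n):
--     sub_li.sort(key=lambda x: x[n])
--     return sub_li
--
-- def value_cut(sub, trees):
--     k = len(trees)
--     value_array = [sub[4], sub[4], sub[4], sub[4]]
--     temp = sub
--     temp_array = []
--     for i in range(k):
--         if trees[i][0]==sub[0] and trees[i][1]>sub[1]:
--             temp_array.append(trees[i])
--     temp_array = sort(temp_array, 1)
--     for i in temp_array:
--         if (temp[3]-i[3])>0 and (temp[2]-abs(i[1]-temp[1]))>0: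
--             temp = i
--             value_array[0] += i[4]
--         else:
--             break
-- #-----------------------------------------------------------------------------#
--     temp = sub
--     temp_array = []
--     for i in range(k):
--         if trees[i][0] == sub[0] and trees[i][1]<sub[1]:
--             temp_array.append(trees[i])
--     temp_array = sort(temp_array, 1)[::-1]
--     for i in temp_array:
--         if (temp[3] - i[3])>0 and (temp[2] - abs(i[1] - temp[1])) > 0:
--             temp = i
--             value_array[1] += i[4]
--         else:
--             break
-- # -----------------------------------------------------------------------------#
--     temp = sub
--     temp_array = []
--     for i in range(k):
--         if trees[i][0] < sub[0] and trees[i][1] == sub[1]: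
--             temp_array.append(trees[i])
--     temp_array = sort(temp_array, 0)[::-1]
--     for i in temp_array:
--         if (temp[3] - i[3])>0 and (temp[2] - abs(i[0] - temp[0])) > 0:
--             temp = i
--             value_array[2] += i[4]
--         else:
--             break
-- # -----------------------------------------------------------------------------#
--     temp = sub
--     temp_array = []
--     for i in range(k):
--         if trees[i][0] > sub[0] and trees[i][1] == sub[1]:
--             temp_array.append(trees[i])
--     temp_array = sort(temp_array, 0)
--     for i in temp_array:
--         if (temp[3] - i[3])>0 and (temp[2] - abs(i[0] - temp[0])) > 0:
--             temp = i
--             value_array[3] += i[4]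
--         else:
--             break
-- #-----------------------------------------------------------------------------#
--     maxv = max(value_array)
--     return [maxv, value_array.index(maxv)]
-- ===== SOURCE B (Python) =====
-- def value_cut(sub, trees):
--     # Selection-based greedy: instead of sorting each directional list, repeatedly
--     # scan the remaining pool for the next tree (nearest along the axis, ties by
--     # original position) and walk until the first rejection.  No sort anywhere.
--     def better(a, b, axis, descending):
--         if descending:
--             return a[1][axis] > b[1][axis] or (a[1][axis] == b[1][axis] and a[0] > b[0])
--         return a[1][axis] < b[1][axis] or (a[1][axis] == b[1][axis] and a[0] < b[0])
--
--     def chain(pool, axis, descending):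
--         total, prev = sub[4], sub
--         while pool:
--             best = pool[0]
--             for e in pool:
--                 if better(e, best, axis, descending):
--                     best = e
--             t = best[1]
--             if prev[3] - t[3] > 0 and prev[2] - abs(t[axis] - prev[axis]) > 0:
--                 total += t[4]
--                 prev = t
--                 pool = [e for e in pool if e[0] != best[0]]
--             else:
--                 break
--         return total
--
--     cand = list(enumerate(trees))
--     vals = [chain([e for e in cand if e[1][0] == sub[0] and e[1][1] > sub[1]], 1, False),
--             chain([e for e in cand if e[1][0] == sub[0] and e[1][1] < sub[1]], 1, True),
--             chain([e for e in cand if e[1][0] < sub[0] and e[1][1] == sub[1]], 0, True),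
--             chain([e for e in cand if e[1][0] > sub[0] and e[1][1] == sub[1]], 0, False)]
--     best = max(vals)
--     return [best, vals.index(best)]
-- ===== Notes on version B (the rewrite author's own statement) =====
-- stated objective: alternative
-- what changed: B eliminates A's four sort passes entirely: for each direction it keeps an index-tagged pool and repeatedly selects the next tree by a linear scan (extremal coordinate, ties by original position), removing it from the pool, until the greedy test first fails.
-- outside the precondition, e.g. on value_cut([0, 0, 1, 1, 1], [[0, 1, 0, 5, 0], [0, 2]]): A returns [1, 0], B returns [1, 0]
import Mathlib
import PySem

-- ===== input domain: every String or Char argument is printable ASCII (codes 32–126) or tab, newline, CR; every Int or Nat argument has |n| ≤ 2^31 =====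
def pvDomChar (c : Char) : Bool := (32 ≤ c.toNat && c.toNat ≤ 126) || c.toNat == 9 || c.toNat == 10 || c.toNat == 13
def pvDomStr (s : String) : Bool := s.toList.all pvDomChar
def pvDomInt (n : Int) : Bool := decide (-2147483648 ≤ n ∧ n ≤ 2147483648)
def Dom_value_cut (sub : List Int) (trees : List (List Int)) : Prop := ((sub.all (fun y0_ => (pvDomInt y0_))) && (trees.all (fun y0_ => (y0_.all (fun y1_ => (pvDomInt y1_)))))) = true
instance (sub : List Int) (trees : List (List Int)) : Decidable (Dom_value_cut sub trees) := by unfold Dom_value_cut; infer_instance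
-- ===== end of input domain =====

-- B replaces A's four sort-then-walk blocks by a selection-based greedy: an index-tagged
-- pool is scanned repeatedly for the next tree (extremal coordinate, ties by original
-- position) — no sorting anywhere; same return value (no argument is mutated by either).

-- ===== PORT A =====
-- helper 'sort(sub_li, n)': sort by the n-th component
def vcSortA (sub_li : List (List Int)) (n : Nat) : List (List Int) :=
  PySem.List.sorted sub_li (fun x => x.getD n 0) false

-- A's four inline break-loops, one function each (index hard-coded as in the source)
def vcLoopUp : List Int → Int → List (List Int) → Int
  | _,    v, [] => v
  | temp, v, i :: rest =>
    if temp.getD 3 0 - i.getD 3 0 > 0 ∧ temp.getD 2 0 - |i.getD 1 0 - temp.getD 1 0| > 0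
    then vcLoopUp i (v + i.getD 4 0) rest else v

def vcLoopDown : List Int → Int → List (List Int) → Int
  | _,    v, [] => v
  | temp, v, i :: rest =>
    if temp.getD 3 0 - i.getD 3 0 > 0 ∧ temp.getD 2 0 - |i.getD 1 0 - temp.getD 1 0| > 0
    then vcLoopDown i (v + i.getD 4 0) rest else v

def vcLoopLeft : List Int → Int → List (List Int) → Int
  | _,    v, [] => v
  | temp, v, i :: rest =>
    if temp.getD 3 0 - i.getD 3 0 > 0 ∧ temp.getD 2 0 - |i.getD 0 0 - temp.getD 0 0| > 0
    then vcLoopLeft i (v + i.getD 4 0) rest else v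

def vcLoopRight : List Int → Int → List (List Int) → Int
  | _,    v, [] => v
  | temp, v, i :: rest =>
    if temp.getD 3 0 - i.getD 3 0 > 0 ∧ temp.getD 2 0 - |i.getD 0 0 - temp.getD 0 0| > 0
    then vcLoopRight i (v + i.getD 4 0) rest else v

def value_cut (sub : List Int) (trees : List (List Int)) : List Int :=
  let v0 := vcLoopUp sub (sub.getD 4 0)
      (vcSortA (trees.filter fun t => decide (t.getD 0 0 = sub.getD 0 0) && decide (t.getD 1 0 > sub.getD 1 0)) 1)
  let v1 := vcLoopDown sub (sub.getD 4 0)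
      ((vcSortA (trees.filter fun t => decide (t.getD 0 0 = sub.getD 0 0) && decide (t.getD 1 0 < sub.getD 1 0)) 1).reverse)
  let v2 := vcLoopLeft sub (sub.getD 4 0)
      ((vcSortA (trees.filter fun t => decide (t.getD 0 0 < sub.getD 0 0) && decide (t.getD 1 0 = sub.getD 1 0)) 0).reverse)
  let v3 := vcLoopRight sub (sub.getD 4 0)
      (vcSortA (trees.filter fun t => decide (t.getD 0 0 > sub.getD 0 0) && decide (t.getD 1 0 = sub.getD 1 0)) 0)
  let value_array := [v0, v1, v2, v3]
  let maxv := (PySem.List.max? value_array (fun y => y)).getD 0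
  [maxv, ((PySem.List.index? value_array maxv).getD 0 : Nat)]

-- ===== PORT B =====
-- 'better(a, b, axis, descending)': lexicographic comparison on (coordinate, original index)
def vcBetter (ax : Nat) (desc : Bool) (a b : Int × List Int) : Bool :=
  if desc then
    decide (b.2.getD ax 0 < a.2.getD ax 0) || (decide (a.2.getD ax 0 = b.2.getD ax 0) && decide (b.1 < a.1))
  else
    decide (a.2.getD ax 0 < b.2.getD ax 0) || (decide (a.2.getD ax 0 = b.2.getD ax 0) && decide (a.1 < b.1))

-- 'chain(pool, axis, descending)': while-loop ported with fuel := pool length (each accepted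
-- step removes one pool element, so the fuel never runs out); exact otherwise, step for step
def vcChainF (ax : Nat) (desc : Bool) : Nat → Int → List Int → List (Int × List Int) → Int
  | _, total, _, [] => total
  | 0, total, _, _ :: _ => total
  | fuel + 1, total, prev, e0 :: tl =>
    let best := (e0 :: tl).foldl (fun b e => if vcBetter ax desc e b then e else b) e0
    if prev.getD 3 0 - best.2.getD 3 0 > 0 ∧ prev.getD 2 0 - |best.2.getD ax 0 - prev.getD ax 0| > 0 then
      vcChainF ax desc fuel (total + best.2.getD 4 0) best.2 ((e0 :: tl).filter (fun e => decide (e.1 ≠ best.1)))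
    else total

def value_cut_alt (sub : List Int) (trees : List (List Int)) : List Int :=
  let cand := PySem.List.enumerate trees
  let p0 := cand.filter fun e => decide (e.2.getD 0 0 = sub.getD 0 0) && decide (e.2.getD 1 0 > sub.getD 1 0)
  let p1 := cand.filter fun e => decide (e.2.getD 0 0 = sub.getD 0 0) && decide (e.2.getD 1 0 < sub.getD 1 0)
  let p2 := cand.filter fun e => decide (e.2.getD 0 0 < sub.getD 0 0) && decide (e.2.getD 1 0 = sub.getD 1 0)
  let p3 := cand.filter fun e => decide (e.2.getD 0 0 > sub.getD 0 0) && decide (e.2.getD 1 0 = sub.getD 1 0)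
  let vals := [vcChainF 1 false p0.length (sub.getD 4 0) sub p0,
               vcChainF 1 true  p1.length (sub.getD 4 0) sub p1,
               vcChainF 0 true  p2.length (sub.getD 4 0) sub p2,
               vcChainF 0 false p3.length (sub.getD 4 0) sub p3]
  let best := (PySem.List.max? vals (fun y => y)).getD 0
  [best, ((PySem.List.index? vals best).getD 0 : Nat)]

-- ===== PRECONDITION & SPEC =====
-- Pre_ excludes inputs where some tree row is too short for the fields the code reads:
-- rows shorter than 2 make the direction filters raise IndexError, and rows shorter than 5
-- that lie in sub's row or column make the greedy walk raise IndexError unless an earlier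
-- break happens to hide them (that break-dependent case is excluded too; see the cite).
def Pre_value_cut (sub : List Int) (trees : List (List Int)) : Prop :=
  5 ≤ sub.length ∧ ∀ t ∈ trees, 2 ≤ t.length ∧
    (((t.getD 0 0 = sub.getD 0 0 ∧ t.getD 1 0 ≠ sub.getD 1 0) ∨
      (t.getD 1 0 = sub.getD 1 0 ∧ t.getD 0 0 ≠ sub.getD 0 0)) → 5 ≤ t.length)
instance (sub : List Int) (trees : List (List Int)) : Decidable (Pre_value_cut sub trees) := by
  unfold Pre_value_cut; infer_instance

def pvWitness_value_cut : List Int × List (List Int) :=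
  ([0, 0, 2, 3, 1], [[0, 1, 2, 2, 5], [1, 0, 1, 1, 7], [2, 2, 1, 1, 9]])

def Spec_value_cut (sub : List Int) (trees : List (List Int)) (out : List Int) : Prop := out = value_cut_alt sub trees
instance (sub : List Int) (trees : List (List Int)) (out : List Int) : Decidable (Spec_value_cut sub trees out) := by unfold Spec_value_cut; infer_instance

-- ===== CLAIM (what is proved, stated in full; the proofs are below) =====
def Claim_equal_value_cut : Prop := ∀ (sub : List Int) (trees : List (List Int)), Dom_value_cut sub trees → Pre_value_cut sub trees → Spec_value_cut sub trees (value_cut sub trees)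

-- ===== LEMMAS AND PROOFS =====

-- proof-side generic walk (the common shape of A's four loops)
def vcWalk (ax : Nat) : Int → List Int → List (List Int) → Int
  | total, _,    [] => total
  | total, prev, t :: rest =>
    if prev.getD 3 0 - t.getD 3 0 > 0 ∧ prev.getD 2 0 - |t.getD ax 0 - prev.getD ax 0| > 0
    then vcWalk ax (total + t.getD 4 0) t rest else total

theorem vcLoopUp_eq (temp : List Int) (v : Int) (l : List (List Int)) :
    vcLoopUp temp v l = vcWalk 1 v temp l := by
  induction l generalizing temp v with
  | nil => rfl
  | cons t rest ih => simp only [vcLoopUp, vcWalk]; split_ifs <;> simp [ih]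

theorem vcLoopDown_eq (temp : List Int) (v : Int) (l : List (List Int)) :
    vcLoopDown temp v l = vcWalk 1 v temp l := by
  induction l generalizing temp v with
  | nil => rfl
  | cons t rest ih => simp only [vcLoopDown, vcWalk]; split_ifs <;> simp [ih]

theorem vcLoopLeft_eq (temp : List Int) (v : Int) (l : List (List Int)) :
    vcLoopLeft temp v l = vcWalk 0 v temp l := by
  induction l generalizing temp v with
  | nil => rfl
  | cons t rest ih => simp only [vcLoopLeft, vcWalk]; split_ifs <;> simp [ih]

theorem vcLoopRight_eq (temp : List Int) (v : Int) (l : List (List Int)) :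
    vcLoopRight temp v l = vcWalk 0 v temp l := by
  induction l generalizing temp v with
  | nil => rfl
  | cons t rest ih => simp only [vcLoopRight, vcWalk]; split_ifs <;> simp [ih]

-- basic facts about the comparison
theorem vcBetter_asymm (ax : Nat) (desc : Bool) (x y : Int × List Int)
    (h : vcBetter ax desc x y = true) : vcBetter ax desc y x = false := by
  cases desc
  all_goals simp [vcBetter] at h ⊢
  all_goals omega

theorem vcBetter_swap (ax : Nat) (a b : Int × List Int) :
    vcBetter ax true a b = true ↔ vcBetter ax false b a = true := by
  simp [vcBetter] <;> omega

-- the selection fold returns the strictly-best element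
theorem vcFold_argbest {α : Type} (bt : α → α → Bool)
    (hasym : ∀ x y, bt x y = true → bt y x = false) (m : α) :
    ∀ (l : List α) (b0 : α), (∀ e ∈ l, e = m ∨ bt m e = true) → (b0 = m ∨ bt m b0 = true) →
      (m = b0 ∨ m ∈ l) →
      l.foldl (fun b e => if bt e b then e else b) b0 = m := by
  intro l
  induction l with
  | nil => intro b0 _ hb0 hm; simp only [List.foldl_nil]
           rcases hm with hm | hm
           · exact hm.symm
           · cases hm
  | cons e rest ih =>
    intro b0 hall hb0 hm
    simp only [List.foldl_cons]
    have hbtmm : bt m m = false := by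
      by_cases h : bt m m = true
      · have := hasym m m h; rw [this] at h; exact absurd h (by simp)
      · simpa using h
    have he := hall e (by simp)
    have hb1 : (if bt e b0 then e else b0) = m ∨ bt m (if bt e b0 then e else b0) = true := by
      split_ifs with hc
      · exact he
      · exact hb0
    apply ih _ (fun x hx => hall x (by simp [hx])) hb1
    -- m = b1 ∨ m ∈ rest
    rcases hm with hm | hm
    · -- m = b0
      subst hm
      left
      split_ifs with hc
      · rcases he with he | he
        · exact he.symm
        · rw [hasym m e he] at hc; exact absurd hc (by simp)
      · rfl
    · rcases List.mem_cons.mp hm with hm | hm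
      · -- m = e
        subst hm
        left
        split_ifs with hc
        · rfl
        · rcases hb0 with h | h
          · exact h.symm
          · rw [h] at hc; exact absurd rfl hc
      · right; exact hm

-- removing by (unique) index is erasing the element
theorem vcFilter_ne_fst (pool : List (Int × List Int)) (m : Int × List Int)
    (hnd : (pool.map Prod.fst).Nodup) (hm : m ∈ pool) :
    pool.filter (fun e => decide (e.1 ≠ m.1)) = pool.erase m := by
  induction pool with
  | nil => cases hm
  | cons a l ih =>
    simp only [List.map_cons, List.nodup_cons] at hnd
    by_cases ha : a = m
    · subst ha
      have : ∀ e ∈ l, e.1 ≠ a.1 := by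
        intro e he hc
        exact hnd.1 (hc ▸ List.mem_map_of_mem he)
      rw [List.erase_cons_head]
      simp only [List.filter_cons, decide_eq_true_eq]
      rw [if_neg (by simp)]
      exact List.filter_eq_self.mpr (fun e he => by simpa using this e he)
    · have hml : m ∈ l := (List.mem_cons.mp hm).resolve_left (fun h => ha h.symm)
      have hane : a.1 ≠ m.1 := by
        intro hc
        exact hnd.1 (hc ▸ List.mem_map_of_mem hml)
      rw [List.erase_cons_tail (by simp [ha])]
      simp only [List.filter_cons, decide_eq_true_eq]
      rw [if_pos (by simpa using hane)]
      rw [ih hnd.2 hml]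

-- the selection chain equals the walk over any strictly-vcBetter-sorted arrangement
theorem vcChain_eq (ax : Nat) (desc : Bool) :
    ∀ (s pool : List (Int × List Int)) (fuel : Nat) (total : Int) (prev : List Int),
      pool.Perm s →
      s.Pairwise (fun a b => vcBetter ax desc a b = true) →
      (s.map Prod.fst).Nodup →
      pool.length ≤ fuel →
      vcChainF ax desc fuel total prev pool = vcWalk ax total prev (s.map Prod.snd) := by
  intro s
  induction s with
  | nil =>
    intro pool fuel total prev hperm _ _ _
    have : pool = [] := List.perm_nil.mp hperm
    subst this
    cases fuel <;> rfl
  | cons m rest ih =>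
    intro pool fuel total prev hperm hpw hnd hfuel
    have hpne : pool ≠ [] := by
      intro h; subst h; exact absurd hperm.symm (by simp)
    obtain ⟨e0, tl, rfl⟩ := List.exists_cons_of_ne_nil hpne
    obtain ⟨f, rfl⟩ : ∃ f, fuel = f + 1 := by
      cases fuel
      · simp at hfuel
      · exact ⟨_, rfl⟩
    rw [List.pairwise_cons] at hpw
    have hmem : ∀ e ∈ e0 :: tl, e = m ∨ vcBetter ax desc m e = true := by
      intro e he
      have : e ∈ m :: rest := hperm.mem_iff.mp he
      rcases List.mem_cons.mp this with h | h
      · exact Or.inl h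
      · exact Or.inr (hpw.1 e h)
    have hmpool : m ∈ e0 :: tl := hperm.mem_iff.mpr (by simp)
    have hbest : (e0 :: tl).foldl (fun b e => if vcBetter ax desc e b then e else b) e0 = m := by
      apply vcFold_argbest _ (vcBetter_asymm ax desc) m _ e0 hmem (hmem e0 (by simp)) (Or.inr hmpool)
    simp only [vcChainF, hbest, List.map_cons, vcWalk]
    split_ifs with hc
    · have hndpool : ((e0 :: tl).map Prod.fst).Nodup := ((hperm.map Prod.fst).nodup_iff).mpr hnd
      rw [vcFilter_ne_fst _ m hndpool hmpool]
      apply ih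
      · have h1 : ((e0 :: tl).erase m).Perm ((m :: rest).erase m) := hperm.erase m
        simpa using h1
      · exact hpw.2
      · simp only [List.map_cons, List.nodup_cons] at hnd
        exact hnd.2
      · have hlen : ((e0 :: tl).erase m).length = tl.length := by
          rw [List.length_erase_of_mem hmpool]; rfl
        rw [hlen]
        simpa using hfuel
    · rfl

-- stability of PySem's sort: with strictly increasing tags, the sorted list is
-- strictly increasing for the lexicographic comparison vcBetter
theorem vcInsertBy_pairwise (ax : Nat) (x : Int × List Int) (acc : List (Int × List Int))
    (hp : acc.Pairwise (fun a b => vcBetter ax false a b = true))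
    (hlt : ∀ y ∈ acc, y.1 < x.1) :
    (PySem.List.insertBy (fun a b => decide (a.2.getD ax 0 < b.2.getD ax 0)) x acc).Pairwise
      (fun a b => vcBetter ax false a b = true) := by
  induction acc with
  | nil => simp [PySem.List.insertBy]
  | cons y ys ih =>
    rw [List.pairwise_cons] at hp
    simp only [PySem.List.insertBy]
    split_ifs with hc
    · -- x goes in front: key x < key y ≤ key of everything after
      simp only [decide_eq_true_eq] at hc
      rw [List.pairwise_cons]
      refine ⟨?_, List.pairwise_cons.mpr hp⟩
      intro z hz
      rcases List.mem_cons.mp hz with h | h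
      · subst h
        simp [vcBetter, List.getD_eq_getElem?_getD] at hc ⊢
        omega
      · have := hp.1 z h
        simp [vcBetter, List.getD_eq_getElem?_getD] at this hc ⊢
        omega
    · -- key y ≤ key x: y stays in front
      simp only [decide_eq_true_eq, not_lt] at hc
      rw [List.pairwise_cons]
      constructor
      · intro z hz
        rcases (PySem.List.mem_insertBy _ _ _ _).mp hz with h | h
        · subst h
          have hyx := hlt y (by simp)
          simp [vcBetter, List.getD_eq_getElem?_getD] at hc ⊢
          omega
        · exact hp.1 z h
      · exact ih hp.2 (fun z hz => hlt z (by simp [hz]))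

theorem vcSorted_pairwise (ax : Nat) :
    ∀ (pool acc : List (Int × List Int)),
      pool.Pairwise (fun a b => a.1 < b.1) →
      acc.Pairwise (fun a b => vcBetter ax false a b = true) →
      (∀ y ∈ acc, ∀ x ∈ pool, y.1 < x.1) →
      (pool.foldl (fun acc x => PySem.List.insertBy (fun a b => decide (a.2.getD ax 0 < b.2.getD ax 0)) x acc) acc).Pairwise
        (fun a b => vcBetter ax false a b = true) := by
  intro pool
  induction pool with
  | nil => intro acc _ hacc _; simpa using hacc
  | cons x rest ih =>
    intro acc hpool hacc hcross
    rw [List.pairwise_cons] at hpool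
    simp only [List.foldl_cons]
    apply ih _ hpool.2
    · exact vcInsertBy_pairwise ax x acc hacc (fun y hy => hcross y hy x (by simp))
    · intro y hy z hz
      rcases (PySem.List.mem_insertBy _ _ _ _).mp hy with h | h
      · subst h; exact hpool.1 z hz
      · exact hcross y h z (by simp [hz])

theorem vcSorted_pairs_pairwise (ax : Nat) (pool : List (Int × List Int))
    (hpool : pool.Pairwise (fun a b => a.1 < b.1)) :
    (PySem.List.sorted pool (fun e => e.2.getD ax 0) false).Pairwise
      (fun a b => vcBetter ax false a b = true) := by
  rw [PySem.List.sorted_eq_foldl_insertBy]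
  exact vcSorted_pairwise ax pool [] hpool (by simp) (by simp)

-- sorting the snd-projection = projecting the pair-sort (the key reads only snd)
theorem vcInsertBy_map (ax : Nat) (x : Int × List Int) (acc : List (Int × List Int)) :
    (PySem.List.insertBy (fun a b => decide (a.2.getD ax 0 < b.2.getD ax 0)) x acc).map Prod.snd =
      PySem.List.insertBy (fun a b => decide (a.getD ax 0 < b.getD ax 0)) x.2 (acc.map Prod.snd) := by
  induction acc with
  | nil => simp [PySem.List.insertBy]
  | cons y ys ih =>
    simp only [PySem.List.insertBy, List.map_cons]
    split_ifs <;> simp_all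

theorem vcSorted_map_snd (ax : Nat) :
    ∀ (pool acc : List (Int × List Int)),
      (pool.foldl (fun acc x => PySem.List.insertBy (fun a b => decide (a.2.getD ax 0 < b.2.getD ax 0)) x acc) acc).map Prod.snd =
        (pool.map Prod.snd).foldl (fun acc x => PySem.List.insertBy (fun a b => decide (a.getD ax 0 < b.getD ax 0)) x acc) (acc.map Prod.snd) := by
  intro pool
  induction pool with
  | nil => intro acc; simp
  | cons x rest ih =>
    intro acc
    simp only [List.foldl_cons, List.map_cons]
    rw [ih, vcInsertBy_map]

theorem vcSorted_snd (ax : Nat) (pool : List (Int × List Int)) :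
    PySem.List.sorted (pool.map Prod.snd) (fun t => t.getD ax 0) false =
      (PySem.List.sorted pool (fun e => e.2.getD ax 0) false).map Prod.snd := by
  rw [PySem.List.sorted_eq_foldl_insertBy, PySem.List.sorted_eq_foldl_insertBy]
  rw [vcSorted_map_snd]
  rfl

-- filter on the snd component commutes with the snd projection
theorem vcMap_snd_filter (p : List Int → Bool) (l : List (Int × List Int)) :
    (l.filter (fun e => p e.2)).map Prod.snd = (l.map Prod.snd).filter p := by
  induction l with
  | nil => rfl
  | cons a l ih =>
    simp only [List.filter_cons, List.map_cons]
    split_ifs with h <;> simp [ih]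

-- one direction, ascending: A's sort-then-walk = B's selection chain
theorem vcDir_asc (ax : Nat) (sub : List Int) (trees : List (List Int)) (p : List Int → Bool) :
    vcWalk ax (sub.getD 4 0) sub (PySem.List.sorted (trees.filter p) (fun x => x.getD ax 0) false) =
      vcChainF ax false ((PySem.List.enumerate trees).filter (fun e => p e.2)).length
        (sub.getD 4 0) sub ((PySem.List.enumerate trees).filter (fun e => p e.2)) := by
  set pool := (PySem.List.enumerate trees).filter (fun e => p e.2) with hpool
  have hpw : pool.Pairwise (fun a b => a.1 < b.1) :=
    List.Pairwise.sublist List.filter_sublist (PySem.List.pairwise_lt_enumerate trees 0)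
  have hsnd : pool.map Prod.snd = trees.filter p := by
    rw [hpool, vcMap_snd_filter]
    rw [PySem.List.map_snd_enumerate]
  set s := PySem.List.sorted pool (fun e => e.2.getD ax 0) false with hs
  have h1 : PySem.List.sorted (trees.filter p) (fun x => x.getD ax 0) false = s.map Prod.snd := by
    rw [← hsnd, vcSorted_snd]
  rw [h1]
  symm
  apply vcChain_eq ax false s pool
  · exact (PySem.List.sorted_perm pool _ _).symm
  · exact vcSorted_pairs_pairwise ax pool hpw
  · have hperm : (s.map Prod.fst).Perm (pool.map Prod.fst) :=
      (PySem.List.sorted_perm pool _ _).map Prod.fst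
    exact hperm.nodup_iff.mpr ((List.pairwise_map.mpr hpw).imp ne_of_lt)
  · exact le_refl _

-- one direction, descending: A walks the reversed sort; B's chain uses the flipped comparison
theorem vcDir_desc (ax : Nat) (sub : List Int) (trees : List (List Int)) (p : List Int → Bool) :
    vcWalk ax (sub.getD 4 0) sub (PySem.List.sorted (trees.filter p) (fun x => x.getD ax 0) false).reverse =
      vcChainF ax true ((PySem.List.enumerate trees).filter (fun e => p e.2)).length
        (sub.getD 4 0) sub ((PySem.List.enumerate trees).filter (fun e => p e.2)) := by
  set pool := (PySem.List.enumerate trees).filter (fun e => p e.2) with hpool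
  have hpw : pool.Pairwise (fun a b => a.1 < b.1) :=
    List.Pairwise.sublist List.filter_sublist (PySem.List.pairwise_lt_enumerate trees 0)
  have hsnd : pool.map Prod.snd = trees.filter p := by
    rw [hpool, vcMap_snd_filter]
    rw [PySem.List.map_snd_enumerate]
  set s := (PySem.List.sorted pool (fun e => e.2.getD ax 0) false).reverse with hs
  have h1 : (PySem.List.sorted (trees.filter p) (fun x => x.getD ax 0) false).reverse = s.map Prod.snd := by
    rw [← hsnd, vcSorted_snd, hs, List.map_reverse]
  rw [h1]
  symm
  apply vcChain_eq ax true s pool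
  · exact ((PySem.List.sorted_perm pool _ _).symm).trans (List.reverse_perm _).symm
  · rw [hs, List.pairwise_reverse]
    have := vcSorted_pairs_pairwise ax pool hpw
    exact this.imp (fun h => (vcBetter_swap ax _ _).mpr h)
  · have hperm : (s.map Prod.fst).Perm (pool.map Prod.fst) := by
      exact ((List.reverse_perm _).trans (PySem.List.sorted_perm pool _ _)).map Prod.fst
    exact hperm.nodup_iff.mpr ((List.pairwise_map.mpr hpw).imp ne_of_lt)
  · exact le_refl _

-- ===== VERDICT (by name: the statement is the Claim_ definition above) =====
theorem value_cut_spec : Claim_equal_value_cut := by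
  intro sub trees _ _
  unfold Spec_value_cut value_cut value_cut_alt vcSortA
  simp only [vcLoopUp_eq, vcLoopDown_eq, vcLoopLeft_eq, vcLoopRight_eq]
  rw [vcDir_asc 1 sub trees, vcDir_desc 1 sub trees, vcDir_desc 0 sub trees, vcDir_asc 0 sub trees]
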